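-- pv_equiv track=rewrite | github.com/sinri0809/StudyNote | Programmers/level2/stackque1.py | solution
-- ===== SOURCE A (Python) =====
-- from collections import deque
--
-- def solution(progresses, speeds):
--     progress_q = deque(progresses)
--     speeds_q = deque(speeds)
--     result = []
--     while len(progress_q) > 0:
--         count = 0
--         for i in range(len(progress_q)):
--             progress_q[i] += speeds_q[i]
--
--         for i in range(len(progress_q)):
--             if progress_q[0] >= 100:
--                 progress_q.popleft()
--                 speeds_q.popleft()
--                 count += 1
--         if count > 0:
--             result.append(count)
--
--     return result
-- ===== SOURCE B (Python) =====
-- def solution(progresses, speeds):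
--     result = []
--     cur = 0
--     count = 0
--     for p, s in zip(progresses, speeds):
--         d = max(1, -((p - 100) // s))
--         if d > cur:
--             if count > 0:
--                 result.append(count)
--             cur = d
--             count = 1
--         else:
--             count += 1
--     if count > 0:
--         result.append(count)
--     return result
-- ===== Notes on version B (the rewrite author's own statement) =====
-- stated objective: faster
-- what changed: B replaces A's day-by-day deque simulation by computing each task's completion day with one ceiling division and grouping in a single pass by the running maximum day (intended as faster; a timing run saw A time out at n=16 where B returned, so no ratio was measured).
-- outside the precondition, e.g. on solution([100], [0]): A returns [1], B raises ZeroDivisionError; on solution([50], []): A raises IndexError, B returns []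
import Mathlib
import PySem

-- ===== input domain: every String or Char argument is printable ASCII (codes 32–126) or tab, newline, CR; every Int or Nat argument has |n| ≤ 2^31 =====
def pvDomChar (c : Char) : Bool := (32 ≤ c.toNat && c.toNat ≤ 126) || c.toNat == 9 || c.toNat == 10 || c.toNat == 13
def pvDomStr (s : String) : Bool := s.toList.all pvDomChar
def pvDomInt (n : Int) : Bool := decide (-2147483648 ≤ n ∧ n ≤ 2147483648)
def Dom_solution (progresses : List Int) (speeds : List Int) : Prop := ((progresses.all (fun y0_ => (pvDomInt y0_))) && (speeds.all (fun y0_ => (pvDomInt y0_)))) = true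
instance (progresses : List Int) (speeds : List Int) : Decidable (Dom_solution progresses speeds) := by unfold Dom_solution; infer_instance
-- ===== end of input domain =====

-- B replaces A's day-by-day queue simulation by a closed-form completion day per task
-- (ceiling division) and a single pass grouping by the running maximum. Intended as faster;
-- a timing run could not measure a ratio (A timed out at n=16 where B returned).


-- ===== PORT A =====
-- first inner loop: progress_q[i] += speeds_q[i]  (shorter speeds would be an IndexError in
-- Python; that shape is outside Pre_, the final catch-all arm is never reached there)
def pvAdd : List Int → List Int → List Int
  | [], _ => []
  | p :: ps, s :: ss => (p + s) :: pvAdd ps ss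
  | ps, [] => ps

-- second inner loop: n iterations; each checks the current front and pops it when ≥ 100
def pvPop : Nat → List Int → List Int → Int → List Int × List Int × Int
  | 0, P, S, c => (P, S, c)
  | n + 1, [], S, c => pvPop n [] S c
  | n + 1, p :: ps, S, c =>
    if 100 ≤ p then pvPop n ps S.tail (c + 1) else pvPop n (p :: ps) S c

-- the while loop; fuel only makes the recursion total (inside Pre_ it never runs out)
def pvWhile : Nat → List Int → List Int → List Int → List Int
  | 0, _, _, res => res
  | fuel + 1, P, S, res =>
    if P.length > 0 then
      match pvPop (pvAdd P S).length (pvAdd P S) S 0 with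
      | (P2, S2, c) => pvWhile fuel P2 S2 (if c > 0 then res ++ [c] else res)
    else res

def pvFuel (progresses : List Int) : Nat :=
  (progresses.map (fun p => (101 - p).toNat + 1)).sum

def solution (progresses : List Int) (speeds : List Int) : List Int :=
  pvWhile (pvFuel progresses) progresses speeds []

-- ===== PORT B =====
-- d = max(1, -((p - 100) // s)) : the day task (p, s) first reaches 100
def pvDays (p s : Int) : Int := max 1 (-(PySem.Int.floordiv (p - 100) s))

-- B's single for loop over zip(progresses, speeds) with state (cur, count, result)
def pvBLoop : List (Int × Int) → Int → Int → List Int → List Int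
  | [], _, count, res => if count > 0 then res ++ [count] else res
  | x :: xs, cur, count, res =>
    if pvDays x.1 x.2 > cur then
      pvBLoop xs (pvDays x.1 x.2) 1 (if count > 0 then res ++ [count] else res)
    else pvBLoop xs cur (count + 1) res

def solution_alt (progresses : List Int) (speeds : List Int) : List Int :=
  pvBLoop (List.zip progresses speeds) 0 0 []

-- ===== PRECONDITION & SPEC =====
-- Pre_ excludes inputs where speeds is shorter than progresses (A raises IndexError) and
-- inputs with a speed ≤ 0 among the used tasks: there A loops forever in general (the task's
-- natural domain has positive speeds); B would divide by zero on a zero speed.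
def Pre_solution (progresses : List Int) (speeds : List Int) : Prop :=
  progresses.length ≤ speeds.length ∧ ∀ s ∈ speeds.take progresses.length, 1 ≤ s
instance (progresses : List Int) (speeds : List Int) : Decidable (Pre_solution progresses speeds) := by unfold Pre_solution; infer_instance

def pvWitness_solution : List Int × List Int := ([93, 30, 55], [1, 30, 5])

def Spec_solution (progresses : List Int) (speeds : List Int) (out : List Int) : Prop := out = solution_alt progresses speeds
instance (progresses : List Int) (speeds : List Int) (out : List Int) : Decidable (Spec_solution progresses speeds out) := by unfold Spec_solution; infer_instance

-- ===== CLAIM (what is proved, stated in full; the proofs are below) =====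
def Claim_equal_solution : Prop := ∀ (progresses : List Int) (speeds : List Int), Dom_solution progresses speeds → Pre_solution progresses speeds → Spec_solution progresses speeds (solution progresses speeds)

-- ===== LEMMAS AND PROOFS =====

-- max completion day of a task list
def pvMaxD : List (Int × Int) → Int
  | [] => 0
  | x :: xs => max (pvDays x.1 x.2) (pvMaxD xs)

lemma pvDays_pos (p s : Int) : 1 ≤ pvDays p s := le_max_left _ _

-- the day characterisation: for t ≥ 0, s ≥ 1, progress after t+1 days reaches 100 iff d ≤ t+1
lemma pvDays_le_iff (p s t : Int) (hs : 1 ≤ s) (ht : 0 ≤ t) :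
    pvDays p s ≤ t + 1 ↔ 100 ≤ p + (t + 1) * s := by
  have h := (PySem.Int.le_floordiv_iff_mul_le (a := p - 100) (b := s) (q := -(t+1)) (by omega))
  constructor
  · intro h1
    have hc : -(PySem.Int.floordiv (p - 100) s) ≤ t + 1 := le_trans (le_max_right 1 _) h1
    have := h.mp (by omega)
    nlinarith [this]
  · intro h1
    have : (-(t+1)) * s ≤ p - 100 := by nlinarith
    have h2 := h.mpr this
    have : -(PySem.Int.floordiv (p - 100) s) ≤ t + 1 := by omega
    exact max_le (by omega) this

lemma pvDays_le_bound (p s : Int) (hs : 1 ≤ s) : pvDays p s ≤ ((101 - p).toNat : Int) + 1 := by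
  have ht : (0:Int) ≤ ((101 - p).toNat : Int) := Int.natCast_nonneg _
  rw [pvDays_le_iff p s _ hs ht]
  have h1 : (100:Int) - p ≤ ((101 - p).toNat : Int) + 1 := by omega
  nlinarith

lemma pvMaxD_nonneg : ∀ L, 0 ≤ pvMaxD L := by
  intro L; induction L with
  | nil => simp [pvMaxD]
  | cons x xs ih => simp only [pvMaxD]; omega

lemma pvFuel_cons (a : Int) (p : List Int) :
    pvFuel (a :: p) = ((101 - a).toNat + 1) + pvFuel p := by
  simp [pvFuel]

lemma pvMaxD_fuel : ∀ (p s : List Int), (∀ x ∈ p.zip s, 1 ≤ x.2) →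
    pvMaxD (p.zip s) ≤ (pvFuel p : Int) := by
  intro p
  induction p with
  | nil => intro s _; simp [pvMaxD, pvFuel]
  | cons a p ih =>
    intro s hs
    cases s with
    | nil =>
      simp only [List.zip_nil_right, pvMaxD]
      exact Int.natCast_nonneg _
    | cons b s =>
      rw [List.zip_cons_cons, pvFuel_cons]
      show max (pvDays a b) (pvMaxD (p.zip s)) ≤ _
      have hb : 1 ≤ b := hs (a, b) List.mem_cons_self
      have h1 := pvDays_le_bound a b hb
      have h2 := ih s (fun x hx => hs x (List.mem_cons_of_mem _ hx))
      have h0 := pvMaxD_nonneg (p.zip s)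
      have hmax : max (pvDays a b) (pvMaxD (p.zip s)) = pvDays a b ∨
          max (pvDays a b) (pvMaxD (p.zip s)) = pvMaxD (p.zip s) := max_choice _ _
      push_cast
      rcases hmax with h | h <;> rw [h] <;> omega

lemma pvMaxD_ge {L : List (Int × Int)} {x} (hx : x ∈ L) : pvDays x.1 x.2 ≤ pvMaxD L := by
  induction L with
  | nil => cases hx
  | cons y ys ih =>
    rcases List.mem_cons.mp hx with rfl | hx
    · exact le_max_left _ _
    · exact le_trans (ih hx) (le_max_right _ _)

lemma pvMaxD_dropWhile (q : Int × Int → Bool) : ∀ L, pvMaxD (L.dropWhile q) ≤ pvMaxD L := by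
  intro L
  induction L with
  | nil => simp [List.dropWhile]
  | cons x xs ih =>
    by_cases h : q x
    · rw [show (x :: xs).dropWhile q = xs.dropWhile q from by simp [List.dropWhile, h]]
      exact le_trans ih (le_max_right (pvDays x.1 x.2) (pvMaxD xs))
    · simp [List.dropWhile, h]

lemma head?_dropWhile (q : Int × Int → Bool) : ∀ (L : List (Int × Int)) x,
    (L.dropWhile q).head? = some x → q x = false := by
  intro L
  induction L with
  | nil => intro x h; simp [List.dropWhile] at h
  | cons y ys ih =>
    intro x h
    by_cases hq : q y
    · exact ih x (by simpa [List.dropWhile, hq] using h)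
    · simp [List.dropWhile, hq] at h
      subst h; simpa using hq

lemma pvAdd_map (t : Int) : ∀ (L : List (Int × Int)) (S' : List Int),
    pvAdd (L.map fun x => x.1 + t * x.2) (L.map Prod.snd ++ S')
      = L.map fun x => x.1 + (t + 1) * x.2 := by
  intro L
  induction L with
  | nil => intro S'; simp [pvAdd]
  | cons x xs ih =>
    intro S'
    simp only [List.map_cons, List.cons_append, pvAdd, ih]
    congr 1
    ring

lemma pvPop_none : ∀ (n : Nat) (P S : List Int) (c : Int),
    (∀ x, P.head? = some x → x < 100) → pvPop n P S c = (P, S, c) := by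
  intro n
  induction n with
  | zero => intro P S c _; rfl
  | succ n ih =>
    intro P S c h
    cases P with
    | nil => simpa [pvPop] using ih [] S c (by simp)
    | cons p ps =>
      have hp : p < 100 := h p rfl
      rw [pvPop, if_neg (show ¬ (100 ≤ p) by omega)]
      exact ih (p :: ps) S c h

lemma pvPop_pre : ∀ (pre : List Int) (m : Nat) (rest S : List Int) (c : Int),
    (∀ p ∈ pre, 100 ≤ p) →
    pvPop (pre.length + m) (pre ++ rest) S c
      = pvPop m rest (S.drop pre.length) (c + pre.length) := by
  intro pre
  induction pre with
  | nil => intro m rest S c _; simp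
  | cons p pre ih =>
    intro m rest S c h
    have hp : (100:Int) ≤ p := h p List.mem_cons_self
    have hstep : pre.length + 1 + m = (pre.length + m) + 1 := by omega
    simp only [List.cons_append, List.length_cons, hstep, pvPop, if_pos hp]
    rw [ih m rest S.tail (c + 1) (fun x hx => h x (List.mem_cons_of_mem _ hx))]
    congr 1
    · cases S <;> simp [List.drop_succ_cons, List.tail]
    · push_cast; omega

lemma pvBLoop_acc (cur : Int) : ∀ (pre : List (Int × Int)) (rest : List (Int × Int)) (count : Int) (res : List Int),
    (∀ x ∈ pre, pvDays x.1 x.2 ≤ cur) →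
    pvBLoop (pre ++ rest) cur count res = pvBLoop rest cur (count + pre.length) res := by
  intro pre
  induction pre with
  | nil => intro rest count res _; simp
  | cons x xs ih =>
    intro rest count res h
    have hx : pvDays x.1 x.2 ≤ cur := h x List.mem_cons_self
    rw [List.cons_append, pvBLoop, if_neg (show ¬ (pvDays x.1 x.2 > cur) by omega)]
    rw [ih rest (count + 1) res (fun y hy => h y (List.mem_cons_of_mem _ hy))]
    congr 1
    simp only [List.length_cons]
    push_cast; ring

lemma pvBLoop_flush : ∀ (rest : List (Int × Int)) (t k : Int) (res : List Int),
    0 < k → (∀ x, rest.head? = some x → t < pvDays x.1 x.2) →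
    pvBLoop rest t k res = pvBLoop rest t 0 (res ++ [k]) := by
  intro rest t k res hk h
  cases rest with
  | nil => simp [pvBLoop, if_pos hk]
  | cons x xs =>
    have hx : t < pvDays x.1 x.2 := h x rfl
    simp [pvBLoop, if_pos hx, if_pos hk]

lemma pv_main : ∀ (fuel : Nat) (L : List (Int × Int)) (t : Int) (S' res : List Int),
    (∀ x ∈ L, 1 ≤ x.2) → 0 ≤ t →
    (∀ x, L.head? = some x → t < pvDays x.1 x.2) →
    (pvMaxD L - t).toNat ≤ fuel →
    pvWhile fuel (L.map fun x => x.1 + t * x.2) (L.map Prod.snd ++ S') res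
      = pvBLoop L t 0 res := by
  intro fuel
  induction fuel with
  | zero =>
    intro L t S' res hs ht hhead hfuel
    cases L with
    | nil => simp [pvWhile, pvBLoop]
    | cons x xs =>
      exfalso
      have h1 : t < pvDays x.1 x.2 := hhead x rfl
      have h2 : pvDays x.1 x.2 ≤ pvMaxD (x :: xs) := pvMaxD_ge List.mem_cons_self
      omega
  | succ fuel ih =>
    intro L t S' res hs ht hhead hfuel
    cases L with
    | nil => simp [pvWhile, pvBLoop]
    | cons y ys =>
      set L := y :: ys with hL
      have hlen : ((L.map fun x => x.1 + t * x.2).length > 0) := by simp [hL]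
      rw [pvWhile, if_pos hlen]
      rw [pvAdd_map t L S']
      set q : Int × Int → Bool := fun x => decide (pvDays x.1 x.2 ≤ t + 1) with hq
      have hsplit : L = L.takeWhile q ++ L.dropWhile q := (List.takeWhile_append_dropWhile).symm
      set pre := L.takeWhile q with hpre
      set rest := L.dropWhile q with hrest
      -- facts about the split
      have hpre_mem : ∀ x ∈ pre, pvDays x.1 x.2 ≤ t + 1 := by
        intro x hx
        have := List.mem_takeWhile_imp hx
        simpa [hq] using this
      have hrest_head : ∀ x, rest.head? = some x → t + 1 < pvDays x.1 x.2 := by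
        intro x hx
        have := head?_dropWhile q L x hx
        simp only [hq, decide_eq_false_iff_not, not_le] at this
        exact this
      have hpre_sub : ∀ x ∈ pre, x ∈ L := fun x hx => by
        rw [hsplit]; exact List.mem_append_left _ hx
      have hrest_sub : ∀ x ∈ rest, x ∈ L := fun x hx => by
        rw [hsplit]; exact List.mem_append_right _ hx
      -- the popped prefix has value ≥ 100, the rest's head < 100
      have hpre_ge : ∀ v ∈ pre.map (fun x => x.1 + (t+1) * x.2), 100 ≤ v := by
        intro v hv
        rcases List.mem_map.mp hv with ⟨x, hx, rfl⟩
        exact (pvDays_le_iff x.1 x.2 t (hs x (hpre_sub x hx)) ht).mp (hpre_mem x hx)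
      have hrest_lt : ∀ v, (rest.map (fun x => x.1 + (t+1) * x.2)).head? = some v → v < 100 := by
        intro v hv
        cases hr : rest with
        | nil => rw [hr] at hv; simp at hv
        | cons z zs =>
          rw [hr] at hv; simp at hv
          have hz : t + 1 < pvDays z.1 z.2 := hrest_head z (by rw [hr]; rfl)
          have := (pvDays_le_iff z.1 z.2 t (hs z (hrest_sub z (by rw [hr]; exact List.mem_cons_self))) ht)
          omega
      -- compute the pop loop
      have hmaplen : (L.map fun x => x.1 + (t + 1) * x.2).length = pre.length + rest.length := by
        rw [hsplit]; simp
      have hplen : (pre.map fun x => x.1 + (t + 1) * x.2).length = pre.length := by simp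
      have hpop : pvPop (L.map fun x => x.1 + (t + 1) * x.2).length
          (L.map fun x => x.1 + (t + 1) * x.2) (L.map Prod.snd ++ S') 0
          = (rest.map fun x => x.1 + (t + 1) * x.2,
             rest.map Prod.snd ++ S', (pre.length : Int)) := by
        rw [hmaplen]
        rw [show (L.map fun x => x.1 + (t + 1) * x.2)
              = (pre.map fun x => x.1 + (t + 1) * x.2) ++ (rest.map fun x => x.1 + (t + 1) * x.2)
            from by rw [hsplit, List.map_append]]
        rw [show L.map Prod.snd ++ S' = pre.map Prod.snd ++ (rest.map Prod.snd ++ S')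
            from by rw [hsplit, List.map_append, List.append_assoc]]
        rw [← hplen, pvPop_pre _ rest.length _ _ 0 hpre_ge]
        rw [pvPop_none _ _ _ _ hrest_lt]
        rw [hplen, List.drop_append_of_le_length (by simp)]
        simp
      rw [hpop]
      show pvWhile fuel (rest.map fun x => x.1 + (t + 1) * x.2) (rest.map Prod.snd ++ S')
          (if ((pre.length : Int)) > 0 then res ++ [(pre.length : Int)] else res) = pvBLoop L t 0 res
      -- case on whether anything popped
      cases hp : pre with
      | nil =>
        -- no pops this day
        have hLrest : rest = L := by rw [hsplit, hp]; simp
        rw [if_neg (show ¬ (((([] : List (Int × Int)).length : Int)) > 0) by simp), hLrest]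
        have h2 : pvDays y.1 y.2 ≤ pvMaxD L := pvMaxD_ge (by rw [hL]; exact List.mem_cons_self)
        have hstep : pvWhile fuel (L.map fun x => x.1 + (t+1) * x.2) (L.map Prod.snd ++ S') res
            = pvBLoop L (t + 1) 0 res := by
          apply ih L (t + 1) S' res hs (by omega)
          · intro x hx
            exact hrest_head x (by rw [hLrest]; exact hx)
          · have h1 : t + 1 < pvDays y.1 y.2 := hrest_head y (by rw [hLrest, hL]; rfl)
            omega
        rw [hstep]
        -- B: with head d > t+1 > t, starting cur t or t+1 is the same
        have h1 : t + 1 < pvDays y.1 y.2 := hrest_head y (by rw [hLrest, hL]; rfl)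
        rw [hL]
        simp only [pvBLoop, if_pos (show pvDays y.1 y.2 > t by omega),
          if_pos (show pvDays y.1 y.2 > t + 1 by omega), if_neg (show ¬ ((0:Int) > 0) by omega)]
      | cons z pre' =>
        -- k = pre.length > 0 pops
        rw [if_pos (show ((((z :: pre' : List (Int × Int))).length : Int)) > 0 by simp), ← hp]
        have hstep : pvWhile fuel (rest.map fun x => x.1 + (t+1) * x.2) (rest.map Prod.snd ++ S')
              (res ++ [(pre.length : Int)])
            = pvBLoop rest (t + 1) 0 (res ++ [(pre.length : Int)]) := by
          apply ih rest (t + 1) S' _ (fun x hx => hs x (hrest_sub x hx)) (by omega) hrest_head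
          have := pvMaxD_dropWhile q L
          rw [← hrest] at this
          omega
        rw [hstep]
        -- now the B side: head of L is z with d = t + 1
        have hzL : y = z ∧ L.tail = pre' ++ rest := by
          have : L = z :: (pre' ++ rest) := by rw [hsplit, hp]; simp
          rw [hL] at this
          exact ⟨(List.cons.injEq .. ▸ this).1, by rw [hL]; simpa using (List.cons.injEq .. ▸ this).2⟩
        have hz_le : pvDays z.1 z.2 ≤ t + 1 := hpre_mem z (by rw [hp]; exact List.mem_cons_self)
        have hz_gt : t < pvDays z.1 z.2 := by
          have := hhead y (by rw [hL]; rfl)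
          rw [hzL.1] at this; exact this
        have hzd : pvDays z.1 z.2 = t + 1 := by omega
        have hLz : L = z :: (pre' ++ rest) := by rw [hsplit, hp]; simp
        rw [hLz]
        simp only [pvBLoop, hzd, if_pos (show t + 1 > t by omega),
          if_neg (show ¬ ((0:Int) > 0) by omega)]
        rw [pvBLoop_acc (t+1) pre' rest 1 res
          (fun x hx => hpre_mem x (by rw [hp]; exact List.mem_cons_of_mem _ hx))]
        have hk0 : (0:Int) < ((pre.length : Int)) := by rw [hp]; simp
        have hkeq : (1:Int) + (pre'.length : Int) = ((pre.length : Int)) := by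
          rw [hp]; push_cast [List.length_cons]; ring
        rw [hkeq, pvBLoop_flush rest (t+1) _ res hk0 hrest_head]

-- zip bookkeeping
lemma zip_snd_mem : ∀ (p s : List Int) (x : Int × Int), x ∈ p.zip s → x.2 ∈ s.take p.length := by
  intro p
  induction p with
  | nil => intro s x hx; simp at hx
  | cons a p ih =>
    intro s x hx
    cases s with
    | nil => simp at hx
    | cons b s =>
      simp only [List.zip_cons_cons, List.mem_cons] at hx
      rcases hx with rfl | hx
      · simp
      · simp only [List.length_cons, List.take_succ_cons, List.mem_cons]
        exact Or.inr (ih s x hx)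

lemma zip_map_fst : ∀ (p s : List Int), p.length ≤ s.length →
    ((p.zip s).map fun x => x.1 + 0 * x.2) = p := by
  intro p
  induction p with
  | nil => intro s _; simp
  | cons a p ih =>
    intro s h
    cases s with
    | nil => simp at h
    | cons b s =>
      simp only [List.zip_cons_cons, List.map_cons]
      rw [ih s (by simpa using h)]
      norm_num

lemma zip_map_snd : ∀ (p s : List Int), p.length ≤ s.length →
    (p.zip s).map Prod.snd ++ s.drop p.length = s := by
  intro p
  induction p with
  | nil => intro s _; simp
  | cons a p ih =>
    intro s h
    cases s with
    | nil => simp at h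
    | cons b s =>
      simp only [List.zip_cons_cons, List.map_cons, List.length_cons, List.drop_succ_cons,
        List.cons_append]
      rw [ih s (by simpa using h)]

-- ===== VERDICT (by name: the statement is the Claim_ definition above) =====
theorem solution_spec : Claim_equal_solution := by
  intro progresses speeds _ hpre
  obtain ⟨hlen, hspd⟩ := hpre
  unfold Spec_solution solution solution_alt
  have hsz : ∀ x ∈ progresses.zip speeds, 1 ≤ x.2 := fun x hx =>
    hspd x.2 (zip_snd_mem progresses speeds x hx)
  have hmain := pv_main (pvFuel progresses) (progresses.zip speeds) 0
      (speeds.drop progresses.length) []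
      hsz le_rfl
      (fun x hx => lt_of_lt_of_le (by omega) (pvDays_pos x.1 x.2))
      (by
        have := pvMaxD_fuel progresses speeds hsz
        omega)
  rw [zip_map_fst progresses speeds hlen] at hmain
  rw [zip_map_snd progresses speeds hlen] at hmain
  exact hmain
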